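-- pv_equiv track=rewrite | github.com/madisonsimons-lab/ai110-module4tinker-docubot-starter | docubot.py | build_sections
-- ===== SOURCE A (Python) =====
-- def build_sections(documents):
--     """
--     Split each document into heading-based sections.
--     """
--     sections = []
--
--     for filename, text in documents:
--         blocks = [block.strip() for block in text.split("\n\n") if block.strip()]
--         current_section = []
--
--         for block in blocks:
--             if block.startswith("#") and current_section:
--                 sections.append((filename, "\n\n".join(current_section)))
--                 current_section = [block]
--             else:
--                 current_section.append(block)
--
--         if current_section:
--             sections.append((filename, "\n\n".join(current_section)))
--
--     return sections
-- ===== SOURCE B (Python) =====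
-- def build_sections(documents):
--     """
--     Split each document into heading-based sections.
--     """
--     sections = []
--     for filename, text in documents:
--         blocks = [block.strip() for block in text.split("\n\n") if block.strip()]
--         while blocks:
--             k = 1
--             while k < len(blocks) and not blocks[k].startswith("#"):
--                 k += 1
--             sections.append((filename, "\n\n".join(blocks[:k])))
--             blocks = blocks[k:]
--     return sections
-- ===== Notes on version B (the rewrite author's own statement) =====
-- stated objective: alternative
-- what changed: Replaces A's accumulate-and-flush state machine (current_section buffer with end-of-loop flush) by a cut-off-the-leading-section loop: repeatedly find the run of non-heading blocks after the first block, emit that slice joined, and continue on the remainder.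
import Mathlib
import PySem

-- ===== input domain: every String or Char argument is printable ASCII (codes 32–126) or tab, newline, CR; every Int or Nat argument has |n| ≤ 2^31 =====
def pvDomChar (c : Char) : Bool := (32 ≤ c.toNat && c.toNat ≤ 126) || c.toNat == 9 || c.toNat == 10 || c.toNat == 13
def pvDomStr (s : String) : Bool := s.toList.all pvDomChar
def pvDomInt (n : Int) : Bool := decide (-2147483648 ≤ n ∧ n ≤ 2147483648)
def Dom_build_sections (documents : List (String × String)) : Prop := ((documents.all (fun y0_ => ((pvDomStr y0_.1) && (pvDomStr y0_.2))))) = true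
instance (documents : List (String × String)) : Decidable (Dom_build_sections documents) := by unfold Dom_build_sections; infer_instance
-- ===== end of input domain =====

-- B replaces A's accumulate-and-flush state machine by repeatedly slicing off the leading section; same values, alternative decomposition.

-- ===== PORT A =====
-- blocks = [block.strip() for block in text.split("\n\n") if block.strip()]  (shared by both Pythons verbatim)
def pvBlocks (text : String) : List String :=
  (((PySem.Str.split? text "\n\n").getD []).map PySem.Str.strip).filter (fun b => b ≠ "")

def build_sections (documents : List (String × String)) : List (String × String) :=
  documents.foldl (fun sections doc =>
    let filename := doc.1
    let blocks := pvBlocks doc.2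
    let st := blocks.foldl (fun st block =>
      if PySem.Str.startswith block "#" && !st.2.isEmpty then
        (st.1 ++ [(filename, PySem.Str.join "\n\n" st.2)], [block])
      else
        (st.1, st.2 ++ [block])) (sections, ([] : List String))
    if st.2.isEmpty then st.1 else st.1 ++ [(filename, PySem.Str.join "\n\n" st.2)]) []

-- ===== PORT B =====
-- inner 'while k < len(blocks) and not blocks[k].startswith("#")' loop, counting from blocks[1:]
def pvRun (bs : List String) : Nat :=
  match bs with
  | [] => 0
  | b :: rest => if PySem.Str.startswith b "#" then 0 else pvRun rest + 1

-- outer 'while blocks:' loop: emit blocks[:k] joined, continue with blocks[k:]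
-- (blocks[:k] = take k, blocks[k:] = drop k for a natural k: PySem.List.slice_to_natCast / slice_from_natCast)
def pvEmit (filename : String) (bs : List String) : List (String × String) :=
  match bs with
  | [] => []
  | b :: rest =>
    let k := pvRun rest
    (filename, PySem.Str.join "\n\n" (b :: rest.take k)) :: pvEmit filename (rest.drop k)
termination_by bs.length
decreasing_by exact Nat.lt_succ_of_le (List.length_drop ▸ Nat.sub_le _ _)

def build_sections_alt (documents : List (String × String)) : List (String × String) :=
  documents.foldl (fun sections doc => sections ++ pvEmit doc.1 (pvBlocks doc.2)) []

-- ===== PRECONDITION & SPEC =====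
def Spec_build_sections (documents : List (String × String)) (out : List (String × String)) : Prop := out = build_sections_alt documents
instance (documents : List (String × String)) (out : List (String × String)) : Decidable (Spec_build_sections documents out) := by unfold Spec_build_sections; infer_instance

-- ===== CLAIM (what is proved, stated in full; the proofs are below) =====
def Claim_equal_build_sections : Prop := ∀ (documents : List (String × String)), Dom_build_sections documents → Spec_build_sections documents (build_sections documents)

-- ===== LEMMAS AND PROOFS =====

-- A's inner step and finish, named for the proofs
def stepA (filename : String) (st : List (String × String) × List String) (block : String) :
    List (String × String) × List String :=
  if PySem.Str.startswith block "#" && !st.2.isEmpty then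
    (st.1 ++ [(filename, PySem.Str.join "\n\n" st.2)], [block])
  else
    (st.1, st.2 ++ [block])

def finishA (filename : String) (st : List (String × String) × List String) : List (String × String) :=
  if st.2.isEmpty then st.1 else st.1 ++ [(filename, PySem.Str.join "\n\n" st.2)]

lemma pvEmit_nil (filename : String) : pvEmit filename [] = [] := by
  rw [pvEmit.eq_def]

lemma pvEmit_cons (filename : String) (b : String) (rest : List String) :
    pvEmit filename (b :: rest) =
      (filename, PySem.Str.join "\n\n" (b :: rest.take (pvRun rest))) ::
        pvEmit filename (rest.drop (pvRun rest)) := by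
  rw [pvEmit.eq_def]

lemma machine_eq (filename : String) (bs : List String) :
    ∀ (cur : List String) (secs : List (String × String)), cur ≠ [] →
    finishA filename (bs.foldl (stepA filename) (secs, cur)) =
      secs ++ (filename, PySem.Str.join "\n\n" (cur ++ bs.take (pvRun bs))) ::
        pvEmit filename (bs.drop (pvRun bs)) := by
  induction bs with
  | nil =>
    intro cur secs hcur
    simp [finishA, pvRun, hcur, pvEmit_nil]
  | cons b rest ih =>
    intro cur secs hcur
    by_cases hb : PySem.Chars.startswith b.toList ['#'] = true
    · have hne : (!cur.isEmpty) = true := by simpa [List.isEmpty_iff] using hcur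
      have hstep : stepA filename (secs, cur) b =
          (secs ++ [(filename, PySem.Str.join "\n\n" cur)], [b]) := by
        simp [stepA, hb, hne]
      simp only [List.foldl_cons, hstep]
      rw [ih [b] _ (by simp)]
      simp [pvRun, hb, pvEmit_cons]
    · have hstep : stepA filename (secs, cur) b = (secs, cur ++ [b]) := by
        simp [stepA, hb]
      simp only [List.foldl_cons, hstep]
      rw [ih (cur ++ [b]) _ (by simp)]
      simp [pvRun, hb]

lemma doc_eq (filename : String) (bs : List String) (secs : List (String × String)) :
    finishA filename (bs.foldl (stepA filename) (secs, ([] : List String))) =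
      secs ++ pvEmit filename bs := by
  cases bs with
  | nil => simp [finishA, pvEmit_nil]
  | cons b rest =>
    have h1 : stepA filename (secs, ([] : List String)) b = (secs, [b]) := by
      simp [stepA]
    simp only [List.foldl_cons, h1]
    rw [machine_eq filename rest [b] secs (by simp), pvEmit_cons]
    simp

lemma foldl_eq (documents : List (String × String)) (secs : List (String × String)) :
    documents.foldl (fun sections doc =>
      finishA doc.1 ((pvBlocks doc.2).foldl (stepA doc.1) (sections, ([] : List String)))) secs =
    documents.foldl (fun sections doc => sections ++ pvEmit doc.1 (pvBlocks doc.2)) secs := by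
  have hfun : (fun (sections : List (String × String)) (doc : String × String) =>
      finishA doc.1 ((pvBlocks doc.2).foldl (stepA doc.1) (sections, ([] : List String)))) =
      (fun sections doc => sections ++ pvEmit doc.1 (pvBlocks doc.2)) := by
    funext sections doc
    exact doc_eq doc.1 (pvBlocks doc.2) sections
  rw [hfun]

-- ===== VERDICT (by name: the statement is the Claim_ definition above) =====
theorem build_sections_spec : Claim_equal_build_sections := by
  intro documents _
  show build_sections documents = build_sections_alt documents
  have h : build_sections documents = documents.foldl (fun sections doc =>
      finishA doc.1 ((pvBlocks doc.2).foldl (stepA doc.1) (sections, ([] : List String)))) [] := rfl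
  rw [h, foldl_eq]
  rfl
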